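-- pv_equiv track=rewrite | github.com/themoss0/pyexam | task25/24869/24869.py | d
-- ===== SOURCE A (Python) =====
-- def d(n):
--     res = set()
--     i = 2
--     while i * i <= n:
--         if n % i == 0:
--             res.add(i)
--             res.add(n // i)
--         i += 1
--     return sorted(res)
-- ===== SOURCE B (Python) =====
-- def d(n):
--     m = n
--     divs = [1]
--     p = 2
--     while p * p <= m:
--         if m % p == 0:
--             pk = []
--             q = 1
--             while m % p == 0:
--                 m //= p
--                 q *= p
--                 pk.append(q)
--             divs = divs + [t * u for t in divs for u in pk]
--         p += 1
--     if m > 1: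
--         divs = divs + [t * m for t in divs]
--     return sorted(t for t in divs if 1 < t < n)
-- ===== Notes on version B (the rewrite author's own statement) =====
-- stated objective: alternative
-- what changed: Replaces A's trial-division collection of factor pairs (i, n//i) in a set by prime factorization: B extracts each prime power from n, generates all divisors as products of an accumulated divisor list with the prime powers, and finally sorts the nontrivial ones; no factor pairing and no set is needed.
import Mathlib
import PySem

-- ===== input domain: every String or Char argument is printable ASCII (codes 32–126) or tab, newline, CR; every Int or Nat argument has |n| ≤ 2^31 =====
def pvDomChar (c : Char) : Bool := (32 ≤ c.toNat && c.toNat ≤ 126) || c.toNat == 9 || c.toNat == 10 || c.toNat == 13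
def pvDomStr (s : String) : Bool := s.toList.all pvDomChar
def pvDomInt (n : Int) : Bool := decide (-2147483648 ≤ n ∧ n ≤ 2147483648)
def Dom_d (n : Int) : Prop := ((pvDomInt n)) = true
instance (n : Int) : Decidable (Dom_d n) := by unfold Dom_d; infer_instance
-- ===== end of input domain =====

-- B replaces the factor-pair collection in a set by prime factorization plus divisor generation (a different algorithm of similar cost).

-- ===== PORT A =====
-- the while loop: runs while i*i <= n, adding i and n//i to the set when i divides n
def dLoop (n i : Int) (res : PySem.Set Int) : PySem.Set Int :=
  if hle : i * i ≤ n then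
    dLoop n (i + 1)
      (if PySem.Int.mod n i = 0 then
        PySem.Set.add (PySem.Set.add res i) (PySem.Int.floordiv n i)
      else res)
  else res
termination_by (n + 1 - i).toNat
decreasing_by
  have hi : i ≤ n := by
    rcases lt_or_ge 0 i with h0 | h0
    · exact le_trans (le_mul_of_one_le_left (le_of_lt h0)
        (by rwa [← zero_add (1 : Int), Int.add_one_le_iff])) hle
    · exact le_trans h0 (le_trans (mul_self_nonneg i) hle)
  have hb : 0 < n + 1 - i := sub_pos.mpr (lt_of_le_of_lt hi (lt_add_one n))
  exact (Int.toNat_lt_toNat hb).mpr (Int.sub_lt_sub_left (lt_add_one i) (n + 1))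

def d (n : Int) : List Int :=
  PySem.List.sorted (dLoop n 2 PySem.Set.empty) (fun x => x) false

-- ===== PORT B =====
-- inner while loop: while m % p == 0: m //= p; q *= p; pk.append(q) — returns (m, q, pk).
-- The '0 < m ∧ 2 ≤ p' conjuncts only make the recursion total; in B they always hold when the guard m % p == 0 does.
-- The subtype carries the bound result ≤ m, used only for the outer loop's termination measure.
def dAltInnerAux (m p q : Int) (pk : List Int) : {r : Int × Int × List Int // r.1 ≤ m} :=
  if h : PySem.Int.mod m p = 0 ∧ 0 < m ∧ 2 ≤ p then
    ⟨(dAltInnerAux (PySem.Int.floordiv m p) p (q * p) (pk ++ [q * p])).val,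
      le_trans (dAltInnerAux (PySem.Int.floordiv m p) p (q * p) (pk ++ [q * p])).2
        (by rw [PySem.Int.floordiv_eq_ediv_of_pos (lt_of_lt_of_le two_pos h.2.2)]
            exact Int.ediv_le_self p (le_of_lt h.2.1))⟩
  else ⟨(m, q, pk), le_refl m⟩
termination_by m.toNat
decreasing_by
  obtain ⟨h1, h2, h3⟩ := h
  obtain ⟨s, hs⟩ := (PySem.Int.mod_eq_zero_iff_dvd m p).mp h1
  have hp0 : (0 : Int) < p := lt_of_lt_of_le two_pos h3
  have hfd : PySem.Int.floordiv m p = s := by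
    rw [PySem.Int.floordiv_eq_ediv_of_pos hp0, hs]
    exact Int.mul_ediv_cancel_left s (ne_of_gt hp0)
  rw [hfd]
  have hspos : 0 < s := Int.pos_of_mul_pos_right (hs ▸ h2) hp0
  have hsm : s < m := hs ▸ ((lt_mul_iff_one_lt_left hspos).mpr (lt_of_lt_of_le one_lt_two h3))
  exact (Int.toNat_lt_toNat h2).mpr hsm

def dAltInner (m p q : Int) (pk : List Int) : Int × Int × List Int :=
  (dAltInnerAux m p q pk).val

-- the comprehension divs + [t * u for t in divs for u in pk]
def extendDivs (divs pk : List Int) : List Int :=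
  divs ++ divs.flatMap (fun t => pk.map (fun u => t * u))

-- outer while loop over candidate primes p: state (m, divs)
def dAltOuter (m p : Int) (divs : List Int) : Int × List Int :=
  if hle : p * p ≤ m then
    if PySem.Int.mod m p = 0 then
      dAltOuter (dAltInner m p 1 []).1 (p + 1) (extendDivs divs (dAltInner m p 1 []).2.2)
    else dAltOuter m (p + 1) divs
  else (m, divs)
termination_by (m + 1 - p).toNat
decreasing_by
  · have hpm : p ≤ m := by
      rcases lt_or_ge 0 p with h0 | h0
      · exact le_trans (le_mul_of_one_le_left (le_of_lt h0)
          (by rwa [← zero_add (1 : Int), Int.add_one_le_iff])) hle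
      · exact le_trans h0 (le_trans (mul_self_nonneg p) hle)
    have hb : 0 < m + 1 - p := sub_pos.mpr (lt_of_le_of_lt hpm (lt_add_one m))
    refine (Int.toNat_lt_toNat hb).mpr ?_
    calc (dAltInner m p 1 []).1 + 1 - (p + 1)
        = (dAltInner m p 1 []).1 - p := Int.add_sub_add_right _ 1 p
      _ ≤ m - p := sub_le_sub_right ((dAltInnerAux m p 1 []).2) p
      _ < m + 1 - p := sub_lt_sub_right (lt_add_one m) p
  · have hpm : p ≤ m := by
      rcases lt_or_ge 0 p with h0 | h0
      · exact le_trans (le_mul_of_one_le_left (le_of_lt h0)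
          (by rwa [← zero_add (1 : Int), Int.add_one_le_iff])) hle
      · exact le_trans h0 (le_trans (mul_self_nonneg p) hle)
    have hb : 0 < m + 1 - p := sub_pos.mpr (lt_of_le_of_lt hpm (lt_add_one m))
    exact (Int.toNat_lt_toNat hb).mpr (Int.sub_lt_sub_left (lt_add_one p) (m + 1))

def d_alt (n : Int) : List Int :=
  let r := dAltOuter n 2 [1]
  let divs := if 1 < r.1 then r.2 ++ r.2.map (fun t => t * r.1) else r.2
  PySem.List.sorted (divs.filter (fun t => 1 < t && t < n)) (fun x => x) false

-- ===== PRECONDITION & SPEC =====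
def Spec_d (n : Int) (out : List Int) : Prop := out = d_alt n
instance (n : Int) (out : List Int) : Decidable (Spec_d n out) := by unfold Spec_d; infer_instance

-- ===== CLAIM (what is proved, stated in full; the proofs are below) =====
def Claim_equal_d : Prop := ∀ (n : Int), Dom_d n → Spec_d n (d n)

-- ===== LEMMAS AND PROOFS =====


-- ---- A-side characterisation (set of factor pairs) ----

lemma nodup_dLoop (n i : Int) (res : PySem.Set Int) (h : res.Nodup) :
    (dLoop n i res).Nodup := by
  fun_induction dLoop n i res with
  | case1 i res hle ih =>
      apply ih
      split
      · exact PySem.Set.nodup_add _ _ (PySem.Set.nodup_add _ _ h)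
      · exact h
  | case2 i res hle => exact h

lemma mem_dLoop (n i : Int) (res : PySem.Set Int) (hi : 2 ≤ i) (x : Int) :
    x ∈ dLoop n i res ↔
      x ∈ res ∨ ∃ j, i ≤ j ∧ j * j ≤ n ∧ PySem.Int.mod n j = 0 ∧
        (x = j ∨ x = PySem.Int.floordiv n j) := by
  fun_induction dLoop n i res with
  | case1 i res hle ih =>
      simp only [dite_eq_ite] at ih
      rw [ih (by omega)]
      constructor
      · rintro (hx | ⟨j, hj1, hj2, hj3, hj4⟩)
        · split at hx
          · rename_i hmod
            rcases (PySem.Set.mem_add _ _ _).mp hx with hx' | hx'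
            · rcases (PySem.Set.mem_add _ _ _).mp hx' with hx'' | hx''
              · exact Or.inl hx''
              · exact Or.inr ⟨i, le_refl i, hle, hmod, Or.inl hx''⟩
            · exact Or.inr ⟨i, le_refl i, hle, hmod, Or.inr hx'⟩
          · exact Or.inl hx
        · exact Or.inr ⟨j, by omega, hj2, hj3, hj4⟩
      · rintro (hx | ⟨j, hj1, hj2, hj3, hj4⟩)
        · left; split
          · exact (PySem.Set.mem_add _ _ _).mpr (Or.inl ((PySem.Set.mem_add _ _ _).mpr (Or.inl hx)))
          · exact hx
        · rcases eq_or_lt_of_le hj1 with heq | hlt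
          · subst heq
            left
            rw [if_pos hj3]
            rcases hj4 with h4 | h4
            · exact (PySem.Set.mem_add _ _ _).mpr (Or.inl ((PySem.Set.mem_add _ _ _).mpr (Or.inr h4)))
            · exact (PySem.Set.mem_add _ _ _).mpr (Or.inr h4)
          · exact Or.inr ⟨j, by omega, hj2, hj3, hj4⟩
  | case2 i res hle =>
      simp only [iff_self_or]
      rintro ⟨j, hj1, hj2, _, _⟩
      exact absurd hj2 (by nlinarith)

-- x comes from some factor pair (j, n//j) with j*j ≤ n iff x itself is a nontrivial divisor
lemma pair_mem_iff (n x : Int) :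
    (∃ j, 2 ≤ j ∧ j * j ≤ n ∧ PySem.Int.mod n j = 0 ∧
      (x = j ∨ x = PySem.Int.floordiv n j)) ↔
    (2 ≤ x ∧ x < n ∧ PySem.Int.mod n x = 0) := by
  constructor
  · rintro ⟨j, hj2, hjj, hmod, hx⟩
    have hjpos : (0 : Int) < j := by omega
    obtain ⟨e, he⟩ := (PySem.Int.mod_eq_zero_iff_dvd n j).mp hmod
    have hfd : PySem.Int.floordiv n j = e := by
      rw [PySem.Int.floordiv_eq_ediv_of_pos hjpos, he]
      exact Int.mul_ediv_cancel_left e (by omega)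
    have hje : j ≤ e := by nlinarith
    rcases hx with rfl | rfl
    · refine ⟨hj2, by nlinarith, hmod⟩
    · rw [hfd]
      refine ⟨by omega, by nlinarith, ?_⟩
      rw [PySem.Int.mod_eq_zero_iff_dvd]
      exact ⟨j, by linarith [he]⟩
  · rintro ⟨hx2, hxn, hmod⟩
    have hxpos : (0 : Int) < x := by omega
    obtain ⟨e, he⟩ := (PySem.Int.mod_eq_zero_iff_dvd n x).mp hmod
    have hfd : PySem.Int.floordiv n x = e := by
      rw [PySem.Int.floordiv_eq_ediv_of_pos hxpos, he]
      exact Int.mul_ediv_cancel_left e (by omega)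
    have he2 : 2 ≤ e := by nlinarith
    by_cases hc : x * x ≤ n
    · exact ⟨x, hx2, hc, hmod, Or.inl rfl⟩
    · have hex : e < x := by nlinarith
      refine ⟨e, he2, by nlinarith, ?_, Or.inr ?_⟩
      · rw [PySem.Int.mod_eq_zero_iff_dvd]; exact ⟨x, by linarith [he]⟩
      · have hepos : (0 : Int) < e := by omega
        rw [PySem.Int.floordiv_eq_ediv_of_pos hepos, he, mul_comm x e]
        exact (Int.mul_ediv_cancel_left x (by omega)).symm

-- ---- number-theoretic helpers for the B side ----

lemma prime_of_no_small (p : Int) (h2 : 2 ≤ p)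
    (h : ∀ k, 2 ≤ k → k < p → ¬ k ∣ p) : Prime p := by
  rw [Int.prime_iff_natAbs_prime, Nat.prime_def_lt]
  refine ⟨by omega, fun a ha hd => ?_⟩
  by_contra hne
  have ha0 : a ≠ 0 := by
    rintro rfl
    rw [Nat.zero_dvd] at hd
    omega
  have hai : (a : Int) ∣ p := by
    have : (a : Int) ∣ (p.natAbs : Int) := Int.natCast_dvd_natCast.mpr hd
    rwa [Int.natAbs_of_nonneg (by omega)] at this
  exact h a (by omega) (by omega) hai

lemma mul_pow_inj (c p t t' : Int) (k k' : ℕ) (hp2 : 2 ≤ p) (hpc : ¬ p ∣ c)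
    (ht : t ∣ c) (ht' : t' ∣ c) (heq : t * p ^ k = t' * p ^ k') : t = t' ∧ k = k' := by
  have hpk : (p : Int) ^ k ≠ 0 := pow_ne_zero _ (by omega)
  have hpk' : (p : Int) ^ k' ≠ 0 := pow_ne_zero _ (by omega)
  rcases le_total k k' with hkk | hkk
  · have hsplit : (p : Int) ^ k' = p ^ (k' - k) * p ^ k := by
      rw [← pow_add]
      congr 1
      omega
    have hcancel : t = t' * p ^ (k' - k) := by
      exact mul_right_cancel₀ hpk (by rw [heq, hsplit]; ring)
    rcases Nat.eq_or_lt_of_le hkk with heqk | hltk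
    · subst heqk
      simp at hcancel
      exact ⟨hcancel, rfl⟩
    · exfalso
      apply hpc
      have hpt : p ∣ t := by
        rw [hcancel]
        exact Dvd.dvd.mul_left (dvd_pow_self p (by omega)) t'
      exact hpt.trans ht
  · have hsplit : (p : Int) ^ k = p ^ (k - k') * p ^ k' := by
      rw [← pow_add]
      congr 1
      omega
    have hcancel : t' = t * p ^ (k - k') := by
      exact mul_right_cancel₀ hpk' (by rw [← heq, hsplit]; ring)
    rcases Nat.eq_or_lt_of_le hkk with heqk | hltk
    · subst heqk
      simp at hcancel
      exact ⟨hcancel.symm, rfl⟩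
    · exfalso
      apply hpc
      have hpt : p ∣ t' := by
        rw [hcancel]
        exact Dvd.dvd.mul_left (dvd_pow_self p (by omega)) t
      exact hpt.trans ht'

lemma dvd_mul_pow_iff (c p : Int) (e : ℕ) (hp : Prime p) (hp2 : 2 ≤ p)
    (x : Int) (hx : 0 < x) :
    x ∣ c * p ^ e ↔ ∃ t k, 0 < t ∧ t ∣ c ∧ k ≤ e ∧ x = t * p ^ k := by
  constructor
  · intro hd
    induction e generalizing x with
    | zero =>
        simp only [pow_zero, mul_one] at hd
        exact ⟨x, 0, hx, hd, le_refl 0, by ring⟩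
    | succ e ih =>
        by_cases hpx : p ∣ x
        · obtain ⟨y, hy⟩ := hpx
          have hypos : 0 < y := by nlinarith
          have hyd : y ∣ c * p ^ e := by
            have h1 : p * y ∣ p * (c * p ^ e) := by
              rw [← hy]
              have : c * p ^ (e + 1) = p * (c * p ^ e) := by ring
              rwa [this] at hd
            exact (Int.mul_dvd_mul_iff_left (by omega : p ≠ 0)).mp h1
          obtain ⟨t, k, ht0, htc, hke, hxtk⟩ := ih y hypos hyd
          exact ⟨t, k + 1, ht0, htc, by omega, by rw [hy, hxtk]; ring⟩
        · have hcop : IsCoprime x (p ^ (e + 1)) :=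
            (((hp.coprime_iff_not_dvd).mpr hpx).symm).pow_right
          have hxc : x ∣ c := hcop.dvd_of_dvd_mul_right hd
          exact ⟨x, 0, hx, hxc, by omega, by ring⟩
  · rintro ⟨t, k, ht0, htc, hke, rfl⟩
    exact mul_dvd_mul htc (pow_dvd_pow p hke)

-- ---- inner loop: extracts the full power of p from m and records the prime powers ----

lemma dAltInner_spec (m p q : Int) (pk : List Int) :
    0 < m → 2 ≤ p →
    ∃ e : ℕ, 0 < (dAltInner m p q pk).1 ∧ m = (dAltInner m p q pk).1 * p ^ e ∧
      ¬ p ∣ (dAltInner m p q pk).1 ∧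
      (dAltInner m p q pk).2.2 = pk ++ (List.range e).map (fun k => q * p ^ (k + 1)) := by
  simp only [dAltInner]
  fun_induction dAltInnerAux m p q pk with
  | case1 m q pk h ih =>
      intro hm hp
      obtain ⟨h1, h2, h3⟩ := h
      obtain ⟨s, hs⟩ := (PySem.Int.mod_eq_zero_iff_dvd m p).mp h1
      have hfd : PySem.Int.floordiv m p = s := by
        rw [PySem.Int.floordiv_eq_ediv_of_pos (by omega), hs, Int.mul_ediv_cancel_left s (by omega)]
      have hspos : 0 < s := by nlinarith
      obtain ⟨e, he1, he2, he3, he4⟩ := ih (by rw [hfd]; exact hspos) hp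
      dsimp only
      rw [hfd] at he1 he2 he3 he4 ⊢
      set r := (dAltInnerAux s p (q * p) (pk ++ [q * p])).val with hr
      refine ⟨e + 1, he1, ?_, he3, ?_⟩
      · rw [hs, he2]
        ring
      · rw [he4]
        have hcons : (List.range (e + 1)).map (fun k => q * p ^ (k + 1)) =
            (q * p) :: (List.range e).map (fun k => (q * p) * p ^ (k + 1)) := by
          rw [List.range_succ_eq_map, List.map_cons, List.map_map]
          congr 1
          · simp
          · apply List.map_congr_left
            intro a _
            simp only [Function.comp, Nat.succ_eq_add_one]
            ring
        simp only [hcons, List.append_assoc, List.singleton_append]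
  | case2 m q pk h =>
      intro hm hp
      have hmod : PySem.Int.mod m p ≠ 0 := fun hc => h ⟨hc, hm, hp⟩
      refine ⟨0, hm, by ring, ?_, by simp⟩
      intro hd
      exact hmod ((PySem.Int.mod_eq_zero_iff_dvd m p).mpr hd)

-- ---- outer loop invariant: divs is exactly the positive divisors of the cofactor n / m ----

lemma dAltOuter_spec (n : Int) (m p : Int) (divs : List Int) :
    0 < m → 2 ≤ p →
    (∀ k, 2 ≤ k → k < p → ¬ k ∣ m) →
    (∃ c, n = c * m ∧ IsCoprime c m ∧ divs.Nodup ∧ (∀ x, x ∈ divs ↔ 0 < x ∧ x ∣ c)) →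
    0 < (dAltOuter m p divs).1 ∧
    (∀ k, 2 ≤ k → k < (dAltOuter m p divs).1 → ¬ k ∣ (dAltOuter m p divs).1) ∧
    ∃ c, n = c * (dAltOuter m p divs).1 ∧ IsCoprime c (dAltOuter m p divs).1 ∧
      (dAltOuter m p divs).2.Nodup ∧ (∀ x, x ∈ (dAltOuter m p divs).2 ↔ 0 < x ∧ x ∣ c) := by
  fun_induction dAltOuter m p divs with
  | case1 m p divs hle hmod ih =>
      intro hm hp hsmall ⟨c, hcm, hcop, hnd, hmem⟩
      obtain ⟨e, hr1, hfact, hndvd, hpk⟩ := dAltInner_spec m p 1 [] hm hp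
      simp only [one_mul, List.nil_append] at hpk
      set m' := (dAltInner m p 1 []).1 with hm'def
      set pkl := (dAltInner m p 1 []).2.2 with hpkdef
      have hpdvd : p ∣ m := (PySem.Int.mod_eq_zero_iff_dvd m p).mp hmod
      have hprime : Prime p :=
        prime_of_no_small p hp (fun k hk1 hk2 hkd => hsmall k hk1 hk2 (hkd.trans hpdvd))
      have hpc : ¬ p ∣ c := by
        intro hd
        have := hcop.isUnit_of_dvd' hd hpdvd
        rw [Int.isUnit_iff] at this
        omega
      have hm'dvd : (dAltInner m p 1 []).1 ∣ m := ⟨p ^ e, hfact⟩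
      apply ih hr1 (by omega)
      · intro k hk1 hk2 hkd
        rcases lt_or_ge k p with hkp | hkp
        · exact hsmall k hk1 hkp (hkd.trans hm'dvd)
        · have : k = p := by omega
          subst this
          exact hndvd hkd
      · refine ⟨c * p ^ e, by rw [hcm, hfact]; ring, ?_, ?_, ?_⟩
        · exact IsCoprime.mul_left (IsCoprime.of_isCoprime_of_dvd_right hcop hm'dvd)
            (((hprime.coprime_iff_not_dvd).mpr hndvd).pow_left)
        · -- nodup of divs ++ flatMap
          rw [extendDivs, List.nodup_append']
          refine ⟨hnd, ?_, ?_⟩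
          · rw [List.nodup_flatMap]
            constructor
            · intro t htmem
              rw [hpk]
              refine (List.nodup_range.map ?_).map ?_
              · intro a b hab
                simp only at hab
                have hppos : (1:Int) < p := by omega
                rcases lt_trichotomy a b with h | h | h
                · exfalso
                  have := pow_lt_pow_right₀ hppos (by omega : a + 1 < b + 1)
                  omega
                · omega
                · exfalso
                  have := pow_lt_pow_right₀ hppos (by omega : b + 1 < a + 1)
                  omega
              · intro a b hab
                have ht0 : 0 < t := ((hmem t).mp htmem).1
                exact mul_left_cancel₀ (by omega) hab
            · apply List.Pairwise.imp_of_mem ?_ hnd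
              intro t t' htm htm' hne x hx1 hx2
              rw [hpk] at hx1 hx2
              simp only [List.mem_map, List.mem_range] at hx1 hx2
              obtain ⟨u1, ⟨a, ha, rfl⟩, hxu1⟩ := hx1
              obtain ⟨u2, ⟨b, hb, rfl⟩, hxu2⟩ := hx2
              have htc := ((hmem t).mp htm).2
              have htc' := ((hmem t').mp htm').2
              have := mul_pow_inj c p t t' (a + 1) (b + 1) hp hpc htc htc'
                (by rw [hxu1, hxu2])
              exact hne this.1
          · intro x hxd hxf
            have hxdc := ((hmem x).mp hxd).2
            rw [List.mem_flatMap] at hxf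
            obtain ⟨t, htmem, hxt⟩ := hxf
            rw [hpk] at hxt
            simp only [List.mem_map, List.mem_range] at hxt
            obtain ⟨u, ⟨a, ha, rfl⟩, rfl⟩ := hxt
            apply hpc
            have : p ∣ t * p ^ (a + 1) :=
              Dvd.dvd.mul_left (dvd_pow_self p (by omega)) t
            exact this.trans hxdc
        · intro x
          rw [extendDivs, List.mem_append, List.mem_flatMap]
          constructor
          · rintro (hx | ⟨t, htmem, hxt⟩)
            · obtain ⟨hx0, hxc⟩ := (hmem x).mp hx
              exact ⟨hx0, hxc.trans (Dvd.intro _ rfl)⟩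
            · rw [hpk] at hxt
              simp only [List.mem_map, List.mem_range] at hxt
              obtain ⟨u, ⟨a, ha, rfl⟩, rfl⟩ := hxt
              obtain ⟨ht0, htc⟩ := (hmem t).mp htmem
              refine ⟨by positivity, ?_⟩
              exact mul_dvd_mul htc (pow_dvd_pow p (by omega))
          · rintro ⟨hx0, hxd⟩
            obtain ⟨t, k, ht0, htc, hke, rfl⟩ :=
              (dvd_mul_pow_iff c p e hprime hp _ hx0).mp hxd
            rcases Nat.eq_zero_or_pos k with hk0 | hkpos
            · subst hk0
              left
              simp only [pow_zero, mul_one]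
              exact (hmem t).mpr ⟨ht0, htc⟩
            · right
              refine ⟨t, (hmem t).mpr ⟨ht0, htc⟩, ?_⟩
              rw [hpk]
              simp only [List.mem_map, List.mem_range]
              exact ⟨p ^ k, ⟨k - 1, by omega, by congr 1; omega⟩, rfl⟩
  | case2 m p divs hle hmod ih =>
      intro hm hp hsmall hinv
      apply ih hm (by omega) ?_ hinv
      intro k hk1 hk2 hkd
      rcases lt_or_ge k p with hkp | hkp
      · exact hsmall k hk1 hkp hkd
      · have hkp' : k = p := by omega
        rw [hkp'] at hkd
        exact hmod ((PySem.Int.mod_eq_zero_iff_dvd m p).mpr hkd)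
  | case3 m p divs hle =>
      intro hm hp hsmall hinv
      refine ⟨hm, ?_, hinv⟩
      dsimp only
      intro k hk2 hkm hkd
      rcases lt_or_ge k p with hkp | hkp
      · exact hsmall k hk2 hkp hkd
      · obtain ⟨j, hj⟩ := hkd
        have hjpos : 0 < j := by nlinarith
        have hj2 : 2 ≤ j := by
          rcases (by omega : j = 1 ∨ 2 ≤ j) with h1 | h2
          · exfalso; rw [h1, mul_one] at hj; omega
          · exact h2
        have hjp : j < p := by nlinarith
        exact hsmall j hj2 hjp ⟨k, by rw [hj]; ring⟩

-- ---- the final 'if m > 1' extension ----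

lemma dFinal_spec (n m : Int) (divs : List Int) (hm : 0 < m)
    (hnos : ∀ k, 2 ≤ k → k < m → ¬ k ∣ m) (c : Int) (hcm : n = c * m)
    (hcop : IsCoprime c m) (hnd : divs.Nodup) (hmem : ∀ x, x ∈ divs ↔ 0 < x ∧ x ∣ c) :
    (if 1 < m then divs ++ divs.map (fun t => t * m) else divs).Nodup ∧
    (∀ x, x ∈ (if 1 < m then divs ++ divs.map (fun t => t * m) else divs) ↔ 0 < x ∧ x ∣ n) := by
  by_cases hm1 : 1 < m
  · rw [if_pos hm1]
    have hprime : Prime m := prime_of_no_small m (by omega) hnos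
    have hmc : ¬ m ∣ c := by
      intro hd
      have := hcop.isUnit_of_dvd' hd (dvd_refl m)
      rw [Int.isUnit_iff] at this
      omega
    constructor
    · rw [List.nodup_append']
      refine ⟨hnd, ?_, ?_⟩
      · have hinj : Function.Injective (fun t : Int => t * m) :=
          fun a b hab => mul_right_cancel₀ (by omega : m ≠ 0) hab
        exact hnd.map hinj
      · intro x hxd hxm
        obtain ⟨t, htmem, rfl⟩ := List.mem_map.mp hxm
        apply hmc
        exact (dvd_mul_left m t).trans ((hmem _).mp hxd).2
    · intro x
      rw [List.mem_append, List.mem_map]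
      constructor
      · rintro (hx | ⟨t, htmem, rfl⟩)
        · obtain ⟨hx0, hxc⟩ := (hmem x).mp hx
          exact ⟨hx0, by rw [hcm]; exact hxc.mul_right m⟩
        · obtain ⟨ht0, htc⟩ := (hmem t).mp htmem
          exact ⟨by nlinarith, by rw [hcm]; exact mul_dvd_mul htc (dvd_refl m)⟩
      · rintro ⟨hx0, hxd⟩
        rw [hcm] at hxd
        have hxd' : x ∣ c * m ^ 1 := by rwa [pow_one]
        obtain ⟨t, k, ht0, htc, hke, rfl⟩ :=
          (dvd_mul_pow_iff c m 1 hprime (by omega) _ hx0).mp hxd'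
        interval_cases k
        · left
          simp only [pow_zero, mul_one]
          exact (hmem t).mpr ⟨ht0, htc⟩
        · right
          exact ⟨t, (hmem t).mpr ⟨ht0, htc⟩, by rw [pow_one]⟩
  · rw [if_neg hm1]
    have : m = 1 := by omega
    subst this
    rw [mul_one] at hcm
    subst hcm
    exact ⟨hnd, hmem⟩

theorem d_spec : Claim_equal_d := by
  intro n _
  unfold Spec_d
  by_cases hn : 0 < n
  · have houter := dAltOuter_spec n n 2 [1] hn (le_refl 2)
      (by intro k hk1 hk2 _; omega)
      ⟨1, (one_mul n).symm, isCoprime_one_left, List.nodup_singleton 1, by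
        intro x
        simp only [List.mem_singleton]
        constructor
        · rintro rfl; exact ⟨one_pos, dvd_refl 1⟩
        · rintro ⟨hx0, hxd⟩; exact Int.eq_one_of_dvd_one (le_of_lt hx0) hxd⟩
    obtain ⟨hmpos, hnos, c, hcm, hcop, hnd, hmem⟩ := houter
    obtain ⟨hDnd, hDmem⟩ := dFinal_spec n (dAltOuter n 2 [1]).1 (dAltOuter n 2 [1]).2
      hmpos hnos c hcm hcop hnd hmem
    have hFnd : ((if 1 < (dAltOuter n 2 [1]).1 then
        (dAltOuter n 2 [1]).2 ++ (dAltOuter n 2 [1]).2.map (fun t => t * (dAltOuter n 2 [1]).1)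
        else (dAltOuter n 2 [1]).2).filter (fun t => 1 < t && t < n)).Nodup := hDnd.filter _
    have hFmem : ∀ x, x ∈ (if 1 < (dAltOuter n 2 [1]).1 then
        (dAltOuter n 2 [1]).2 ++ (dAltOuter n 2 [1]).2.map (fun t => t * (dAltOuter n 2 [1]).1)
        else (dAltOuter n 2 [1]).2).filter (fun t => 1 < t && t < n) ↔
        (2 ≤ x ∧ x < n ∧ PySem.Int.mod n x = 0) := by
      intro x
      rw [List.mem_filter, hDmem x]
      simp only [Bool.and_eq_true, decide_eq_true_eq]
      rw [PySem.Int.mod_eq_zero_iff_dvd]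
      constructor
      · rintro ⟨⟨hx0, hxd⟩, hx1, hxn⟩; exact ⟨by omega, hxn, hxd⟩
      · rintro ⟨hx2, hxn, hxd⟩; exact ⟨⟨by omega, hxd⟩, by omega, hxn⟩
    have hAnd : (dLoop n 2 PySem.Set.empty).Nodup := nodup_dLoop n 2 _ List.nodup_nil
    have hAmem : ∀ x, x ∈ dLoop n 2 PySem.Set.empty ↔
        (2 ≤ x ∧ x < n ∧ PySem.Int.mod n x = 0) := by
      intro x
      rw [mem_dLoop n 2 _ (le_refl 2) x, ← pair_mem_iff]
      simp [PySem.Set.empty]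
    have hperm : ((if 1 < (dAltOuter n 2 [1]).1 then
        (dAltOuter n 2 [1]).2 ++ (dAltOuter n 2 [1]).2.map (fun t => t * (dAltOuter n 2 [1]).1)
        else (dAltOuter n 2 [1]).2).filter (fun t => 1 < t && t < n)).Perm
        (dLoop n 2 PySem.Set.empty) := by
      rw [List.perm_ext_iff_of_nodup hFnd hAnd]
      intro x
      rw [hFmem, hAmem]
    have hLperm : (PySem.List.sorted (dLoop n 2 PySem.Set.empty) (fun x => x) false).Perm
        (dLoop n 2 PySem.Set.empty) := PySem.List.sorted_perm _ _ _
    have hLle : (PySem.List.sorted (dLoop n 2 PySem.Set.empty) (fun x => x) false).Pairwise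
        (fun a b => a ≤ b) := PySem.List.sorted_pairwise _ _
    have hLnd : (PySem.List.sorted (dLoop n 2 PySem.Set.empty) (fun x => x) false).Nodup :=
      (hLperm.nodup_iff).mpr hAnd
    have hLlt : (PySem.List.sorted (dLoop n 2 PySem.Set.empty) (fun x => x) false).Pairwise
        (· < ·) := (hLle.and hLnd).imp (fun h => lt_of_le_of_ne h.1 h.2)
    exact (PySem.List.sorted_eq_of_perm_of_pairwise_lt _ _ _
      (hLperm.trans hperm.symm) hLlt).symm
  · have h1 : dLoop n 2 PySem.Set.empty = PySem.Set.empty := by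
      rw [dLoop, dif_neg (by omega : ¬((2:Int) * 2 ≤ n))]
    have h2 : dAltOuter n 2 [1] = (n, [1]) := by
      rw [dAltOuter, dif_neg (by omega : ¬((2:Int) * 2 ≤ n))]
    simp only [d, d_alt, h1, h2, if_neg (by omega : ¬(1:Int) < n)]
    simp [PySem.Set.empty]
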